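-- pv_equiv track=rewrite | github.com/cjaneyes/10701-TextbookKnowledgeLearner | conceptGraph/if_then_parsing.py | contains_is
-- ===== SOURCE A (Python) =====
-- def contains_is(line):
-- 	tokens = line.split('is ')
-- 	res = ""
-- 	for i in range(0, len(tokens)):
-- 		if i == 0:
-- 			res += tokens[i]+' > '
-- 		else:
-- 			res += 'is '+tokens[i]
-- 	return res
-- ===== SOURCE B (Python) =====
-- def contains_is(line):
--     before, sep, after = line.partition('is ')
--     return before + ' > ' + sep + after
-- ===== Notes on version B (the rewrite author's own statement) =====
-- stated objective: simpler
-- what changed: Replaces the split-into-all-tokens plus index-conditional reconstruction loop with a single str.partition on the first 'is ' and one flat concatenation.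
import Mathlib
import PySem

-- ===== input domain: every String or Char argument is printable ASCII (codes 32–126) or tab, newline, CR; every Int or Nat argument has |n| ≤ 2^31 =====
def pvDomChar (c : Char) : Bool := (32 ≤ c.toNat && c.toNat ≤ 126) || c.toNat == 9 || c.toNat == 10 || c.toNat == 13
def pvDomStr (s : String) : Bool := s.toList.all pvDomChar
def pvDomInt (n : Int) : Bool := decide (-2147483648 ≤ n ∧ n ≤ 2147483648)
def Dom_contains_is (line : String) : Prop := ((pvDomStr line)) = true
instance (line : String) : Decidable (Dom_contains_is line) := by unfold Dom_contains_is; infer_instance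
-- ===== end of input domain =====

-- B replaces A's split-into-all-tokens plus index-conditional reconstruction loop by one
-- str.partition on the first 'is ' and a flat concatenation (objective: simpler).

-- ===== PORT A =====
-- tokens = line.split('is '); loop over range(0, len(tokens)) rebuilding the string.
-- tokens[i] is always in range here, so pyGetD is exact for Python's tokens[i].
def contains_is (line : String) : String :=
  let tokens := (PySem.Str.split? line "is ").getD []
  (PySem.List.pyRange 0 (PySem.List.len tokens) 1).foldl
    (fun res i =>
      if i == 0 then res ++ PySem.List.pyGetD tokens i "" ++ " > "
      else res ++ "is " ++ PySem.List.pyGetD tokens i "") ""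

-- ===== PORT B =====
-- Hand port of str.partition('is ') (PySem has no partition): find the FIRST occurrence with
-- Str.find (exactly CPython's str.find), then take/drop around it — exact on all strings.
def contains_is_alt (line : String) : String :=
  let i := PySem.Str.find line "is "
  if i = -1 then line ++ " > "
  else
    String.ofList (line.toList.take i.toNat) ++ " > " ++ "is " ++
      String.ofList (line.toList.drop (i.toNat + 3))

-- ===== PRECONDITION & SPEC =====
def Spec_contains_is (line : String) (out : String) : Prop := out = contains_is_alt line
instance (line : String) (out : String) : Decidable (Spec_contains_is line out) := by unfold Spec_contains_is; infer_instance

-- ===== CLAIM (what is proved, stated in full; the proofs are below) =====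
def Claim_equal_contains_is : Prop := ∀ (line : String), Dom_contains_is line → Spec_contains_is line (contains_is line)

-- ===== LEMMAS AND PROOFS =====

-- Pure structural version of Python's str.split(sep) for nonempty sep.
def mySplit (sep : List Char) : List Char → List (List Char)
  | [] => [[]]
  | c :: rest =>
    if sep.isPrefixOf (c :: rest) then
      [] :: mySplit sep ((c :: rest).drop (max sep.length 1))
    else (mySplit sep rest).modifyHead (c :: ·)
termination_by l => l.length
decreasing_by
  · simp only [List.length_drop, List.length_cons]; omega
  · simp

theorem mySplit_ne_nil (sep : List Char) (l : List Char) : mySplit sep l ≠ [] := by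
  induction l with
  | nil => simp [mySplit]
  | cons c rest ih =>
    rw [mySplit]
    split
    · simp
    · cases h : mySplit sep rest with
      | nil => exact absurd h ih
      | cons p ps => simp

theorem splitOn_go_spec (sep : List Char) (hsep : sep ≠ []) :
    ∀ (fuel : Nat) (l cur : List Char) (accs : List (List Char)),
      l.length < fuel →
      PySem.Chars.splitOn.go sep fuel l cur accs =
        accs.reverse ++ (mySplit sep l).modifyHead (cur.reverse ++ ·) := by
  intro fuel
  induction fuel with
  | zero => intro l cur accs h; omega
  | succ n ih =>
    intro l cur accs h
    have hs1 : 1 ≤ sep.length := List.length_pos_of_ne_nil hsep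
    cases l with
    | nil =>
      rw [PySem.Chars.splitOn.go]
      simp [mySplit]
      omega
    | cons c rest =>
      have hrest : rest.length < n := by simp at h; omega
      rw [PySem.Chars.splitOn.go]
      by_cases hp : sep.isPrefixOf (c :: rest) = true
      · simp only [hp, if_true]
        rw [ih _ _ _ (by simp only [List.length_drop, List.length_cons]; omega)]
        rw [mySplit]
        simp only [hp, if_true]
        have hmax : max sep.length 1 = sep.length := by omega
        have hm := mySplit_ne_nil sep ((c :: rest).drop (max sep.length 1))
        rw [hmax] at hm
        cases hsp : mySplit sep ((c :: rest).drop sep.length) with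
        | nil => exact absurd hsp hm
        | cons p ps => rw [hmax, hsp]; simp
      · simp only [hp, if_false]
        rw [ih _ _ _ hrest]
        rw [mySplit]
        simp only [hp, if_false]
        cases hsp : mySplit sep rest with
        | nil => exact absurd hsp (mySplit_ne_nil sep rest)
        | cons p ps => simp

theorem splitOn_eq_mySplit (sep : List Char) (hsep : sep ≠ []) (l : List Char) :
    PySem.Chars.splitOn l sep = mySplit sep l := by
  rw [PySem.Chars.splitOn, splitOn_go_spec sep hsep _ _ _ _ (by omega)]
  cases h : mySplit sep l with
  | nil => exact absurd h (mySplit_ne_nil sep l)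
  | cons p ps => simp

-- find on a cons that does not start with sub
theorem find_go_eq (sub : List Char) :
    ∀ (l : List Char) (k : Nat), PySem.Chars.find.go sub l k =
      if PySem.Chars.find l sub = -1 then -1 else PySem.Chars.find l sub + k := by
  intro l
  induction l with
  | nil =>
    intro k
    rw [PySem.Chars.find, PySem.Chars.find.go, PySem.Chars.find.go]
    by_cases h : sub.isEmpty = true <;> simp [h]
  | cons c t ih =>
    intro k
    conv_lhs => rw [PySem.Chars.find.go]
    conv_rhs => rw [PySem.Chars.find, PySem.Chars.find.go]
    by_cases hp : sub.isPrefixOf (c :: t) = true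
    · simp [hp]
    · simp only [hp, Bool.false_eq_true, if_false]
      rw [ih (k+1), ih (0+1)]
      by_cases he : PySem.Chars.find t sub = -1
      · simp [he]
      · have h2 := PySem.Chars.neg_one_le_find t sub
        simp only [he, if_false]
        split_ifs with hx
        · push_cast at hx; omega
        · push_cast; omega

theorem find_cons (sub : List Char) (c : Char) (rest : List Char)
    (h : sub.isPrefixOf (c :: rest) = false) :
    PySem.Chars.find (c :: rest) sub =
      if PySem.Chars.find rest sub = -1 then -1 else PySem.Chars.find rest sub + 1 := by
  rw [PySem.Chars.find, PySem.Chars.find.go]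
  simp only [h, if_false]
  exact find_go_eq sub rest 1

theorem mySplit_no_match (sep : List Char) (hsep : sep ≠ []) (l : List Char)
    (h : PySem.Chars.find l sep = -1) : mySplit sep l = [l] := by
  induction l with
  | nil => simp [mySplit]
  | cons c rest ih =>
    have hinf := (PySem.Chars.find_eq_neg_one_iff _ _).mp h
    have hp : sep.isPrefixOf (c :: rest) = false := by
      by_contra hc
      exact hinf (List.IsPrefix.isInfix (List.isPrefixOf_iff_prefix.mp
        (by revert hc; cases sep.isPrefixOf (c :: rest) <;> simp)))
    have hr : PySem.Chars.find rest sep = -1 := by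
      rw [PySem.Chars.find_eq_neg_one_iff]
      intro hi
      exact hinf (hi.trans (List.suffix_cons c rest).isInfix)
    rw [mySplit]
    simp only [hp, Bool.false_eq_true, if_false, ih hr]
    rfl

theorem mySplit_match (sep : List Char) (hsep : sep ≠ []) (l : List Char)
    (h : 0 ≤ PySem.Chars.find l sep) :
    mySplit sep l =
      l.take (PySem.Chars.find l sep).toNat ::
        mySplit sep (l.drop ((PySem.Chars.find l sep).toNat + sep.length)) := by
  induction l with
  | nil =>
    exfalso
    rw [PySem.Chars.find, PySem.Chars.find.go] at h
    have : sep.isEmpty = false := by cases sep with | nil => exact absurd rfl hsep | cons a b => rfl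
    rw [this] at h
    simp at h
  | cons c rest ih =>
    by_cases hp : sep.isPrefixOf (c :: rest) = true
    · have h0 : PySem.Chars.find (c :: rest) sep = 0 := by
        rw [PySem.Chars.find, PySem.Chars.find.go, hp]; rfl
      rw [mySplit]
      have hmax : max sep.length 1 = sep.length := by
        have := List.length_pos_of_ne_nil hsep; omega
      simp [hp, h0, hmax]
    · have hp' : sep.isPrefixOf (c :: rest) = false := by
        revert hp; cases sep.isPrefixOf (c :: rest) <;> simp
      have hc := find_cons sep c rest hp'
      have hr2 := PySem.Chars.neg_one_le_find rest sep
      by_cases he : PySem.Chars.find rest sep = -1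
      · rw [hc, if_pos he] at h; omega
      · rw [hc, if_neg he] at h ⊢
        have hr0 : 0 ≤ PySem.Chars.find rest sep := by omega
        rw [mySplit]
        simp only [hp', Bool.false_eq_true, if_false, ih hr0]
        have ht : (PySem.Chars.find rest sep + 1).toNat = (PySem.Chars.find rest sep).toNat + 1 := by omega
        rw [ht]
        simp only [List.modifyHead_cons, List.take_succ_cons, List.cons.injEq, true_and]
        congr 1
        rw [show (PySem.Chars.find rest sep).toNat + 1 + sep.length =
            ((PySem.Chars.find rest sep).toNat + sep.length) + 1 from by omega,
          List.drop_succ_cons]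

-- joinA sep reverses mySplit: head kept, each later piece preceded by sep
def joinA (sep : List Char) : List (List Char) → List Char
  | [] => []
  | p :: ps => p ++ (ps.map (sep ++ ·)).flatten

theorem joinA_mySplit (sep : List Char) (hsep : sep ≠ []) :
    ∀ (l : List Char), joinA sep (mySplit sep l) = l := by
  intro l
  induction hn : l.length using Nat.strong_induction_on generalizing l with
  | _ n ih =>
  subst hn
  have hs1 : 1 ≤ sep.length := List.length_pos_of_ne_nil hsep
  by_cases he : PySem.Chars.find l sep = -1
  · rw [mySplit_no_match sep hsep l he]
    simp [joinA]
  · have h0 : 0 ≤ PySem.Chars.find l sep := by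
      have := PySem.Chars.neg_one_le_find l sep; omega
    set n := (PySem.Chars.find l sep).toNat with hn
    have hspec := (PySem.Chars.find_spec h0).1
    have hnl : n ≤ l.length := by
      have := PySem.Chars.find_le_length l sep
      simp [hn]; omega
    have hln : l ≠ [] := by
      intro hl; subst hl
      rw [PySem.Chars.find, PySem.Chars.find.go] at he
      cases sep with
      | nil => exact absurd rfl hsep
      | cons a b => simp at he
    rw [mySplit_match sep hsep l h0, joinA]
    have hrec := ih (l.drop (n + sep.length)).length
      (by simp; have := List.length_pos_of_ne_nil hln; omega) _ rfl
    cases hms : mySplit sep (l.drop (n + sep.length)) with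
    | nil => exact absurd hms (mySplit_ne_nil _ _)
    | cons p ps =>
      rw [hms] at hrec
      simp only [List.map_cons, List.flatten_cons]
      rw [joinA] at hrec
      -- l = take n ++ sep ++ drop (n + sep.length)
      obtain ⟨t, hdrop⟩ := hspec
      calc l.take n ++ (sep ++ p ++ ((ps.map (sep ++ ·)).flatten))
          = l.take n ++ (sep ++ (p ++ (ps.map (sep ++ ·)).flatten)) := by simp
        _ = l.take n ++ (sep ++ l.drop (n + sep.length)) := by rw [hrec]
        _ = l := by
            have hdt : l.drop (n + sep.length) = t := by
              have h2 := congrArg (List.drop sep.length) hdrop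
              simpa [List.drop_drop, List.drop_left, Nat.add_comm] using h2.symm
            rw [hdt, hdrop, List.take_append_drop]

-- A's loop over range(1, len tokens) folds the tail tokens with 'is ' prefixes
theorem loopA_tail (tokens : List String) :
    ∀ (a : Nat) (res : String), 1 ≤ a →
      (PySem.List.pyRange (a : Int) (PySem.List.len tokens) 1).foldl
        (fun res i =>
          if i == 0 then res ++ PySem.List.pyGetD tokens i "" ++ " > "
          else res ++ "is " ++ PySem.List.pyGetD tokens i "") res =
      (tokens.drop a).foldl (fun r u => r ++ "is " ++ u) res := by
  intro a res ha
  induction hk : tokens.length - a generalizing a res with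
  | zero =>
    have hle : PySem.List.len tokens ≤ (a : Int) := by
      simp only [PySem.List.len]; omega
    rw [PySem.List.pyRange_one_eq_nil hle, List.drop_eq_nil_of_le (by omega)]
    rfl
  | succ n ih =>
    have hlt : (a : Int) < PySem.List.len tokens := by
      simp only [PySem.List.len]; omega
    have halen : a < tokens.length := by omega
    rw [PySem.List.pyRange_one_cons hlt]
    simp only [List.foldl_cons]
    have ha0 : ((a : Int) == 0) = false := by simp; omega
    rw [ha0]
    simp only [Bool.false_eq_true, if_false]
    rw [PySem.List.pyGetD_natCast, List.getD_eq_getElem tokens "" halen,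
      List.drop_eq_getElem_cons halen, List.foldl_cons]
    have hcast : (a : Int) + 1 = ((a + 1 : Nat) : Int) := by push_cast; ring
    rw [hcast]
    exact ih (a + 1) _ (by omega) (by omega)

theorem loopA (t : String) (ts : List String) :
    (PySem.List.pyRange 0 (PySem.List.len (t :: ts)) 1).foldl
      (fun res i =>
        if i == 0 then res ++ PySem.List.pyGetD (t :: ts) i "" ++ " > "
        else res ++ "is " ++ PySem.List.pyGetD (t :: ts) i "") "" =
    ts.foldl (fun r u => r ++ "is " ++ u) (t ++ " > ") := by
  have h0 : (0 : Int) < PySem.List.len (t :: ts) := by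
    simp only [PySem.List.len, List.length_cons]; omega
  rw [PySem.List.pyRange_one_cons h0]
  simp only [List.foldl_cons]
  have : ((0 : Int) == 0) = true := rfl
  rw [this]
  simp only [if_true]
  rw [show ((0 : Int) + 1) = ((1 : Nat) : Int) from by norm_num]
  rw [loopA_tail (t :: ts) 1 _ (by omega)]
  simp [PySem.List.pyGetD]

theorem foldl_map_ofList (sep : List Char) (hs : String.ofList sep = "is ") :
    ∀ (cs : List (List Char)) (res : String),
      (cs.map String.ofList).foldl (fun r u => r ++ "is " ++ u) res =
      res ++ String.ofList ((cs.map (sep ++ ·)).flatten) := by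
  intro cs
  induction cs with
  | nil =>
    intro res
    simp only [List.map_nil, List.foldl_nil, List.flatten_nil]
    rw [show String.ofList [] = "" from rfl]
    simp
  | cons c cs' ih =>
    intro res
    simp only [List.map_cons, List.foldl_cons, List.flatten_cons, ih]
    rw [String.ofList_append, String.ofList_append, hs]
    simp [String.append_assoc]

-- ===== VERDICT (by name: the statement is the Claim_ definition above) =====
theorem token_eq (line : String) :
    (PySem.Str.split? line "is ").getD [] =
      (mySplit "is ".toList line.toList).map String.ofList := by
  rw [PySem.Str.split?, PySem.Chars.split?]
  rw [if_neg (by decide)]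
  rw [splitOn_eq_mySplit _ (by decide)]
  rfl

theorem contains_is_spec : Claim_equal_contains_is := by
  intro line _
  unfold Spec_contains_is
  show contains_is line = contains_is_alt line
  rw [contains_is, contains_is_alt]
  simp only [token_eq]
  rw [PySem.Str.find_eq]
  have hsep : ("is ".toList : List Char) ≠ [] := by decide
  by_cases he : PySem.Chars.find line.toList "is ".toList = -1
  · rw [mySplit_no_match _ hsep _ he, if_pos he]
    simp only [List.map_cons, List.map_nil]
    rw [loopA]
    simp [String.ofList_toList]
  · rw [if_neg he]
    have h0 : 0 ≤ PySem.Chars.find line.toList "is ".toList := by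
      have := PySem.Chars.neg_one_le_find line.toList "is ".toList; omega
    set n := (PySem.Chars.find line.toList "is ".toList).toNat with hn
    rw [mySplit_match _ hsep _ h0, ← hn]
    simp only [List.map_cons]
    rw [loopA, foldl_map_ofList "is ".toList (by decide)]
    have h3 : ("is ".toList : List Char).length = 3 := by decide
    cases hms : mySplit "is ".toList (line.toList.drop (n + "is ".toList.length)) with
    | nil => exact absurd hms (mySplit_ne_nil _ _)
    | cons p ps =>
      have hj := joinA_mySplit "is ".toList hsep (line.toList.drop (n + "is ".toList.length))
      rw [hms, joinA] at hj
      simp only [List.map_cons, List.flatten_cons]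
      rw [show ("is ".toList ++ p ++ (ps.map ("is ".toList ++ ·)).flatten) =
          ("is ".toList ++ (p ++ (ps.map ("is ".toList ++ ·)).flatten)) from by simp, hj]
      rw [String.ofList_append, h3]
      rw [show String.ofList "is ".toList = "is " from rfl]
      simp only [String.append_assoc]
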